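-- pv_equiv track=rewrite | github.com/NicolasRoss/CP460-Cryptography | A5/mod.py | sub_table
-- ===== SOURCE A (Python) =====
-- def sub(a,b,m):
--     if type(m) is int and type(b) is int and type(a) is int:
--         if m > 0:
--             return (a - b) % m
--
--         return 'Error (sub): Invalid mod'
--     return 'Error (sub): Invalid input num'
--
-- def sub_table(m):
--     if type(m) is int:
--         if m > 0:
--             table = []
--
--             for r in range(m):
--                 row = []
--                 for c in range(m):
--                     row.append(sub(r, c, m))
--
--                 table.append(row)
--
--             return table
--
--     return 'Error (sub_table): Invalid mod'
-- ===== SOURCE B (Python) =====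
-- def sub_table(m):
--     if type(m) is int and m > 0:
--         row = [(0 - c) % m for c in range(m)]
--         table = [row]
--         for _ in range(m - 1):
--             row = [(x + 1) % m for x in row]
--             table.append(row)
--         return table
--     return 'Error (sub_table): Invalid mod'
-- ===== Notes on version B (the rewrite author's own statement) =====
-- stated objective: alternative
-- what changed: B builds only row 0 from the formula and derives each subsequent row from the previous one by the recurrence row[r+1][c] = (row[r][c] + 1) % m, instead of recomputing every cell from (r, c) via the sub helper.
-- outside the precondition, e.g. on sub_table(0): A returns 'Error (sub_table): Invalid mod', B returns 'Error (sub_table): Invalid mod'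
import Mathlib
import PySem

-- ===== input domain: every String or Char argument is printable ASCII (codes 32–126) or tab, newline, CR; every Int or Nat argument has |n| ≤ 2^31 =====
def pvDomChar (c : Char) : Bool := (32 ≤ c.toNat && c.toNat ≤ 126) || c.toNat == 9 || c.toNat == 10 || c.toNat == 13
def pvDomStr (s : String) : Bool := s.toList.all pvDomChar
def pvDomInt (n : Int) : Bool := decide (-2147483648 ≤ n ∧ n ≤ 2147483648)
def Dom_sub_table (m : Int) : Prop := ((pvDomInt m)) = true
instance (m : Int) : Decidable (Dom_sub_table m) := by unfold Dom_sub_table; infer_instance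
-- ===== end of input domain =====

-- B derives each row from the previous one by a recurrence instead of recomputing
-- every cell from (r, c); same cost, different construction (objective: alternative).

-- ===== PORT A =====
-- helper sub(a, b, m): on Pre_ (m > 0, ints) it always takes the int branch
def pySub (a b m : Int) : Int := PySem.Int.mod (a - b) m

def sub_table (m : Int) : List (List Int) :=
  if 0 < m then
    (PySem.List.pyRange 0 m 1).foldl
      (fun table r =>
        table ++ [(PySem.List.pyRange 0 m 1).foldl (fun row c => row ++ [pySub r c m]) []])
      []
  else []  -- Python returns the error string here; excluded by Pre_sub_table

-- ===== PORT B =====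
def sub_table_alt (m : Int) : List (List Int) :=
  if 0 < m then
    let row0 := (PySem.List.pyRange 0 m 1).map (fun c => PySem.Int.mod (0 - c) m)
    ((PySem.List.pyRange 0 (m - 1) 1).foldl
      (fun (st : List (List Int) × List Int) _ =>
        let r := st.2.map (fun x => PySem.Int.mod (x + 1) m)
        (st.1 ++ [r], r))
      ([row0], row0)).1
  else []  -- Python returns the error string here; excluded by Pre_sub_table

-- ===== PRECONDITION & SPEC =====
-- Pre_: on m ≤ 0 or non-int m the Python returns an error STRING, not a table.
def Pre_sub_table (m : Int) : Prop := 0 < m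
instance (m : Int) : Decidable (Pre_sub_table m) := by unfold Pre_sub_table; infer_instance
def pvWitness_sub_table : Int := (3)

def Spec_sub_table (m : Int) (out : List (List Int)) : Prop := out = sub_table_alt m
instance (m : Int) (out : List (List Int)) : Decidable (Spec_sub_table m out) := by unfold Spec_sub_table; infer_instance

-- ===== CLAIM =====
def Claim_equal_sub_table : Prop := ∀ (m : Int), Dom_sub_table m → Pre_sub_table m → Spec_sub_table m (sub_table m)

-- ===== LEMMAS AND PROOFS =====

-- closed form of row r of A's table
def rowF (m r : Int) : List Int :=
  (PySem.List.pyRange 0 m 1).map (fun c => PySem.Int.mod (r - c) m)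

theorem foldl_app {α β : Type} (f : α → β) (l : List α) (init : List β) :
    l.foldl (fun acc x => acc ++ [f x]) init = init ++ l.map f := by
  induction l generalizing init with
  | nil => simp
  | cons a t ih => simp [List.foldl, ih]

theorem subA_rows (m : Int) (hm : 0 < m) :
    sub_table m = (PySem.List.pyRange 0 m 1).map (rowF m) := by
  simp only [sub_table, if_pos hm]
  rw [foldl_app (fun r => (PySem.List.pyRange 0 m 1).foldl
        (fun row c => row ++ [pySub r c m]) [])]
  simp only [List.nil_append]
  apply List.map_congr_left
  intro r _
  rw [foldl_app (fun c => pySub r c m)]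
  simp [rowF, pySub]

theorem mod_step (m x : Int) (hm : 0 < m) :
    PySem.Int.mod (PySem.Int.mod x m + 1) m = PySem.Int.mod (x + 1) m := by
  rw [PySem.Int.mod_eq_emod_of_pos hm, PySem.Int.mod_eq_emod_of_pos hm,
      PySem.Int.mod_eq_emod_of_pos hm, Int.add_comm, Int.add_emod_emod, Int.add_comm]

theorem next_rowF (m r : Int) (hm : 0 < m) :
    (rowF m r).map (fun x => PySem.Int.mod (x + 1) m) = rowF m (r + 1) := by
  simp only [rowF, List.map_map]
  apply List.map_congr_left
  intro c _
  simp only [Function.comp]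
  rw [mod_step m (r - c) hm]
  ring_nf

-- B's fold over pyRange a b 1 with state (rows so far, current row = rowF m a)
theorem alt_loop (m : Int) (hm : 0 < m) (a b : Int) (acc : List (List Int)) :
    ((PySem.List.pyRange a b 1).foldl
      (fun (st : List (List Int) × List Int) _ =>
        let r := st.2.map (fun x => PySem.Int.mod (x + 1) m)
        (st.1 ++ [r], r))
      (acc, rowF m a)).1 = acc ++ (PySem.List.pyRange (a + 1) (b + 1) 1).map (rowF m) := by
  by_cases hab : b ≤ a
  · rw [PySem.List.pyRange_one_eq_nil hab, PySem.List.pyRange_one_eq_nil (by omega)]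
    simp
  · have hlt : a < b := by omega
    rw [PySem.List.pyRange_one_cons hlt, PySem.List.pyRange_one_cons (by omega : a + 1 < b + 1)]
    simp only [List.foldl_cons, List.map_cons]
    rw [next_rowF m a hm]
    have := alt_loop m hm (a + 1) b (acc ++ [rowF m (a + 1)])
    rw [this]
    simp
termination_by (b - a).toNat
decreasing_by omega

-- ===== VERDICT =====
theorem sub_table_spec : Claim_equal_sub_table := by
  intro m _ hm
  replace hm : 0 < m := hm
  unfold Spec_sub_table
  rw [subA_rows m hm]
  simp only [sub_table_alt]
  rw [if_pos hm]
  have h0 : (PySem.List.pyRange 0 m 1).map (fun c => PySem.Int.mod (0 - c) m) = rowF m 0 := rfl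
  rw [h0, alt_loop m hm 0 (m - 1) [rowF m 0]]
  rw [show m - 1 + 1 = m from by ring]
  rw [PySem.List.pyRange_one_cons hm]
  simp
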